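-- pv_equiv track=rewrite | github.com/sjramblings/serverless-hackathon-opendata-pulse | opendata-pulse/docs/utils/infrastructure_analyzer.py | _infer_service_purpose
-- ===== SOURCE A (Python) =====
-- from typing import Dict, List, Any, Tuple
--
-- def _infer_service_purpose(resources: List[Dict[str, str]]) -> str:
--     """Infer the primary purpose of a service based on its resources."""
--     purposes = [res['purpose'] for res in resources]
--
--     if any('storage' in purpose.lower() for purpose in purposes):
--         return "Data storage and management"
--     elif any('compute' in purpose.lower() or 'function' in purpose.lower() for purpose in purposes):
--         return "Serverless compute and processing"
--     elif any('api' in purpose.lower() or 'auth' in purpose.lower() for purpose in purposes):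
--         return "API and authentication services"
--     elif any('map' in purpose.lower() or 'location' in purpose.lower() for purpose in purposes):
--         return "Geographic and location services"
--     else:
--         return "Infrastructure services"
-- ===== SOURCE B (Python) =====
-- _LABELS = [
--     "Data storage and management",
--     "Serverless compute and processing",
--     "API and authentication services",
--     "Geographic and location services",
--     "Infrastructure services",
-- ]
--
--
-- def _rank(purpose):
--     p = purpose.lower()
--     if 'storage' in p:
--         return 0
--     if 'compute' in p or 'function' in p:
--         return 1
--     if 'api' in p or 'auth' in p:
--         return 2
--     if 'map' in p or 'location' in p:
--         return 3
--     return 4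
--
--
-- def _infer_service_purpose(resources):
--     best = 4
--     for res in resources:
--         best = min(best, _rank(res['purpose']))
--     return _LABELS[best]
-- ===== Notes on version B (the rewrite author's own statement) =====
-- stated objective: alternative
-- what changed: Replaces A's purposes list plus four priority-ordered any() scans with a single fold that computes the minimum per-resource priority rank and maps the winning rank to its label.
-- outside the precondition, e.g. on _infer_service_purpose([{}]): A raises KeyError, B raises KeyError
import Mathlib
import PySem

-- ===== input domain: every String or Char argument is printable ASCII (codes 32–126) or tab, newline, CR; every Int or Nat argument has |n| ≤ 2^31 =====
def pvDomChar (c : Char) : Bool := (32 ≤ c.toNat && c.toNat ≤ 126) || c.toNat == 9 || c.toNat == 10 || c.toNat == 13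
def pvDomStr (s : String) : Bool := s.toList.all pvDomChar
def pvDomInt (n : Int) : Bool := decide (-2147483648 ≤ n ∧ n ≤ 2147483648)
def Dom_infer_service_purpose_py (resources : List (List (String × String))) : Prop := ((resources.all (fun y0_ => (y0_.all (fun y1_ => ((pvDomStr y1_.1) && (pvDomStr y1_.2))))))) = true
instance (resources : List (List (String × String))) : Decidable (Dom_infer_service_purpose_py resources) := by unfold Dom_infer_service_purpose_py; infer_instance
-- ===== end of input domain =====

-- B replaces A's four priority-ordered any()-scans by one fold that minimises a per-resource rank (alternative decomposition, same cost class).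

-- ===== PORT A =====
-- res['purpose'] : Pre_ guarantees the key is present, so getD never falls back to "".
def pvGetPurpose (res : List (String × String)) : String :=
  (PySem.Dict.mk res).getD "purpose" ""

def infer_service_purpose_py (resources : List (List (String × String))) : String :=
  let purposes := resources.map pvGetPurpose
  if purposes.any (fun p => PySem.Str.isIn "storage" (PySem.Str.lower p)) then
    "Data storage and management"
  else if purposes.any (fun p => PySem.Str.isIn "compute" (PySem.Str.lower p) || PySem.Str.isIn "function" (PySem.Str.lower p)) then
    "Serverless compute and processing"
  else if purposes.any (fun p => PySem.Str.isIn "api" (PySem.Str.lower p) || PySem.Str.isIn "auth" (PySem.Str.lower p)) then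
    "API and authentication services"
  else if purposes.any (fun p => PySem.Str.isIn "map" (PySem.Str.lower p) || PySem.Str.isIn "location" (PySem.Str.lower p)) then
    "Geographic and location services"
  else
    "Infrastructure services"

-- ===== PORT B =====
def pvRank (purpose : String) : Nat :=
  if PySem.Str.isIn "storage" (PySem.Str.lower purpose) then 0
  else if PySem.Str.isIn "compute" (PySem.Str.lower purpose) || PySem.Str.isIn "function" (PySem.Str.lower purpose) then 1
  else if PySem.Str.isIn "api" (PySem.Str.lower purpose) || PySem.Str.isIn "auth" (PySem.Str.lower purpose) then 2
  else if PySem.Str.isIn "map" (PySem.Str.lower purpose) || PySem.Str.isIn "location" (PySem.Str.lower purpose) then 3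
  else 4

def pvLabel (r : Nat) : String :=
  match r with
  | 0 => "Data storage and management"
  | 1 => "Serverless compute and processing"
  | 2 => "API and authentication services"
  | 3 => "Geographic and location services"
  | _ => "Infrastructure services"

def infer_service_purpose_py_alt (resources : List (List (String × String))) : String :=
  pvLabel (resources.foldl (fun best res => min best (pvRank (pvGetPurpose res))) 4)

-- ===== PRECONDITION & SPEC =====
-- Pre_ excludes resources missing the 'purpose' key, on which A raises KeyError.
def Pre_infer_service_purpose_py (resources : List (List (String × String))) : Prop :=
  ∀ res ∈ resources, "purpose" ∈ res.map Prod.fst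

instance (resources : List (List (String × String))) : Decidable (Pre_infer_service_purpose_py resources) := by
  unfold Pre_infer_service_purpose_py; infer_instance

def pvWitness_infer_service_purpose_py : (List (List (String × String))) :=
  [[("purpose", "Storage bucket")], [("purpose", "API handler")]]

def Spec_infer_service_purpose_py (resources : List (List (String × String))) (out : String) : Prop :=
  out = infer_service_purpose_py_alt resources

instance (resources : List (List (String × String))) (out : String) : Decidable (Spec_infer_service_purpose_py resources out) := by
  unfold Spec_infer_service_purpose_py; infer_instance

-- ===== CLAIM =====
def Claim_equal_infer_service_purpose_py : Prop :=
  ∀ (resources : List (List (String × String))), Dom_infer_service_purpose_py resources →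
    Pre_infer_service_purpose_py resources →
    Spec_infer_service_purpose_py resources (infer_service_purpose_py resources)

-- ===== LEMMAS AND PROOFS =====

theorem pv_foldl_min_le_init (xs : List Nat) (a : Nat) : xs.foldl min a ≤ a := by
  induction xs generalizing a with
  | nil => simp
  | cons y ys ih => exact le_trans (ih (min a y)) (by omega)

theorem pv_foldl_min_le (xs : List Nat) (x : Nat) (a : Nat) (h : x ∈ xs) :
    xs.foldl min a ≤ x := by
  induction xs generalizing a with
  | nil => cases h
  | cons y ys ih =>
    simp only [List.foldl_cons]
    rcases List.mem_cons.mp h with rfl | h'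
    · exact le_trans (pv_foldl_min_le_init ys (min a x)) (by omega)
    · exact ih (min a y) h'

theorem pv_le_foldl_min (xs : List Nat) (b : Nat) (a : Nat) (ha : b ≤ a)
    (h : ∀ x ∈ xs, b ≤ x) : b ≤ xs.foldl min a := by
  induction xs generalizing a with
  | nil => simpa using ha
  | cons y ys ih =>
    exact ih (min a y) (by have := h y (by simp); omega)
      (fun x hx => h x (by simp [hx]))

theorem pvRank_eq_zero_iff (p : String) :
    pvRank p = 0 ↔ PySem.Str.isIn "storage" (PySem.Str.lower p) = true := by
  unfold pvRank; split_ifs <;> simp_all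

theorem pvRank_le_one_iff (p : String) :
    pvRank p ≤ 1 ↔ (PySem.Str.isIn "storage" (PySem.Str.lower p)
      || PySem.Str.isIn "compute" (PySem.Str.lower p)
      || PySem.Str.isIn "function" (PySem.Str.lower p)) = true := by
  unfold pvRank; split_ifs <;> simp_all

theorem pvRank_le_two_iff (p : String) :
    pvRank p ≤ 2 ↔ (PySem.Str.isIn "storage" (PySem.Str.lower p)
      || PySem.Str.isIn "compute" (PySem.Str.lower p)
      || PySem.Str.isIn "function" (PySem.Str.lower p)
      || PySem.Str.isIn "api" (PySem.Str.lower p)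
      || PySem.Str.isIn "auth" (PySem.Str.lower p)) = true := by
  unfold pvRank; split_ifs <;> simp_all

theorem pvRank_le_three_iff (p : String) :
    pvRank p ≤ 3 ↔ (PySem.Str.isIn "storage" (PySem.Str.lower p)
      || PySem.Str.isIn "compute" (PySem.Str.lower p)
      || PySem.Str.isIn "function" (PySem.Str.lower p)
      || PySem.Str.isIn "api" (PySem.Str.lower p)
      || PySem.Str.isIn "auth" (PySem.Str.lower p)
      || PySem.Str.isIn "map" (PySem.Str.lower p)
      || PySem.Str.isIn "location" (PySem.Str.lower p)) = true := by
  unfold pvRank; split_ifs <;> simp_all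

-- The fold in B is the minimum rank over all resources (seeded with 4).
theorem pv_best_eq (resources : List (List (String × String))) :
    resources.foldl (fun best res => min best (pvRank (pvGetPurpose res))) 4
      = (resources.map (fun res => pvRank (pvGetPurpose res))).foldl min 4 := by
  rw [List.foldl_map]

-- ===== VERDICT =====
set_option maxHeartbeats 1000000 in
theorem infer_service_purpose_py_spec : Claim_equal_infer_service_purpose_py := by
  intro resources _hdom _hpre
  simp only [Spec_infer_service_purpose_py, infer_service_purpose_py,
    infer_service_purpose_py_alt]
  rw [pv_best_eq]
  set xs := resources.map (fun res => pvRank (pvGetPurpose res)) with hxs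
  by_cases h1 : (resources.map pvGetPurpose).any
      (fun p => PySem.Str.isIn "storage" (PySem.Str.lower p)) = true
  · obtain ⟨p, hp, hst⟩ := List.any_eq_true.mp h1
    obtain ⟨res, hres, rfl⟩ := List.mem_map.mp hp
    have hmem : pvRank (pvGetPurpose res) ∈ xs := List.mem_map.mpr ⟨res, hres, rfl⟩
    have h0 : pvRank (pvGetPurpose res) = 0 := (pvRank_eq_zero_iff _).mpr hst
    have hbest : xs.foldl min 4 = 0 :=
      Nat.le_zero.mp (h0 ▸ pv_foldl_min_le xs _ 4 hmem)
    rw [if_pos h1, hbest]; rfl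
  · rw [if_neg h1]
    have hno1 : ∀ res ∈ resources,
        ¬ PySem.Str.isIn "storage" (PySem.Str.lower (pvGetPurpose res)) = true :=
      fun res hres hc => h1 (List.any_eq_true.mpr
        ⟨pvGetPurpose res, List.mem_map_of_mem hres, hc⟩)
    have hge1 : ∀ x ∈ xs, 1 ≤ x := by
      intro x hx
      obtain ⟨res, hres, rfl⟩ := List.mem_map.mp hx
      have h0 : pvRank (pvGetPurpose res) ≠ 0 :=
        fun hz => hno1 res hres ((pvRank_eq_zero_iff _).mp hz)
      omega
    by_cases h2 : (resources.map pvGetPurpose).any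
        (fun p => PySem.Str.isIn "compute" (PySem.Str.lower p)
          || PySem.Str.isIn "function" (PySem.Str.lower p)) = true
    · obtain ⟨p, hp, hcf⟩ := List.any_eq_true.mp h2
      obtain ⟨res, hres, rfl⟩ := List.mem_map.mp hp
      have hmem : pvRank (pvGetPurpose res) ∈ xs := List.mem_map.mpr ⟨res, hres, rfl⟩
      have hle : pvRank (pvGetPurpose res) ≤ 1 := by
        rw [pvRank_le_one_iff]
        simp only [Bool.or_eq_true] at hcf
        rcases hcf with h | h <;> simp at h <;> simp [h]
      have hbest : xs.foldl min 4 = 1 :=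
        le_antisymm (le_trans (pv_foldl_min_le xs _ 4 hmem) hle)
          (pv_le_foldl_min xs 1 4 (by omega) hge1)
      rw [if_pos h2, hbest]; rfl
    · rw [if_neg h2]
      have hno2 : ∀ res ∈ resources,
          ¬ (PySem.Str.isIn "compute" (PySem.Str.lower (pvGetPurpose res))
            || PySem.Str.isIn "function" (PySem.Str.lower (pvGetPurpose res))) = true :=
        fun res hres hc => h2 (List.any_eq_true.mpr
          ⟨pvGetPurpose res, List.mem_map_of_mem hres, hc⟩)
      have hge2 : ∀ x ∈ xs, 2 ≤ x := by
        intro x hx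
        obtain ⟨res, hres, rfl⟩ := List.mem_map.mp hx
        have hne1 : pvRank (pvGetPurpose res) ≠ 1 := by
          intro he
          have hch := (pvRank_le_one_iff _).mp (le_of_eq he)
          simp only [Bool.or_eq_true] at hch
          have hn2 := hno2 res hres
          simp only [Bool.or_eq_true, not_or] at hn2
          rcases hch with (hst | hc) | hf
          · exact hno1 res hres hst
          · exact hn2.1 hc
          · exact hn2.2 hf
        have := hge1 _ hx
        omega
      by_cases h3 : (resources.map pvGetPurpose).any
          (fun p => PySem.Str.isIn "api" (PySem.Str.lower p)
            || PySem.Str.isIn "auth" (PySem.Str.lower p)) = true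
      · obtain ⟨p, hp, haa⟩ := List.any_eq_true.mp h3
        obtain ⟨res, hres, rfl⟩ := List.mem_map.mp hp
        have hmem : pvRank (pvGetPurpose res) ∈ xs := List.mem_map.mpr ⟨res, hres, rfl⟩
        have hle : pvRank (pvGetPurpose res) ≤ 2 := by
          rw [pvRank_le_two_iff]
          simp only [Bool.or_eq_true] at haa
          rcases haa with h | h <;> simp at h <;> simp [h]
        have hbest : xs.foldl min 4 = 2 :=
          le_antisymm (le_trans (pv_foldl_min_le xs _ 4 hmem) hle)
            (pv_le_foldl_min xs 2 4 (by omega) hge2)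
        rw [if_pos h3, hbest]; rfl
      · rw [if_neg h3]
        have hno3 : ∀ res ∈ resources,
            ¬ (PySem.Str.isIn "api" (PySem.Str.lower (pvGetPurpose res))
              || PySem.Str.isIn "auth" (PySem.Str.lower (pvGetPurpose res))) = true :=
          fun res hres hc => h3 (List.any_eq_true.mpr
            ⟨pvGetPurpose res, List.mem_map_of_mem hres, hc⟩)
        have hge3 : ∀ x ∈ xs, 3 ≤ x := by
          intro x hx
          obtain ⟨res, hres, rfl⟩ := List.mem_map.mp hx
          have hne2 : pvRank (pvGetPurpose res) ≠ 2 := by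
            intro he
            have hch := (pvRank_le_two_iff _).mp (le_of_eq he)
            simp only [Bool.or_eq_true] at hch
            have hn2 := hno2 res hres
            have hn3 := hno3 res hres
            simp only [Bool.or_eq_true, not_or] at hn2 hn3
            rcases hch with (((hst | hc) | hf) | ha) | hu
            · exact hno1 res hres hst
            · exact hn2.1 hc
            · exact hn2.2 hf
            · exact hn3.1 ha
            · exact hn3.2 hu
          have := hge2 _ hx
          omega
        by_cases h4 : (resources.map pvGetPurpose).any
            (fun p => PySem.Str.isIn "map" (PySem.Str.lower p)
              || PySem.Str.isIn "location" (PySem.Str.lower p)) = true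
        · obtain ⟨p, hp, hml⟩ := List.any_eq_true.mp h4
          obtain ⟨res, hres, rfl⟩ := List.mem_map.mp hp
          have hmem : pvRank (pvGetPurpose res) ∈ xs := List.mem_map.mpr ⟨res, hres, rfl⟩
          have hle : pvRank (pvGetPurpose res) ≤ 3 := by
            rw [pvRank_le_three_iff]
            simp only [Bool.or_eq_true] at hml
            rcases hml with h | h <;> simp at h <;> simp [h]
          have hbest : xs.foldl min 4 = 3 :=
            le_antisymm (le_trans (pv_foldl_min_le xs _ 4 hmem) hle)
              (pv_le_foldl_min xs 3 4 (by omega) hge3)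
          rw [if_pos h4, hbest]; rfl
        · rw [if_neg h4]
          have hno4 : ∀ res ∈ resources,
              ¬ (PySem.Str.isIn "map" (PySem.Str.lower (pvGetPurpose res))
                || PySem.Str.isIn "location" (PySem.Str.lower (pvGetPurpose res))) = true :=
            fun res hres hc => h4 (List.any_eq_true.mpr
              ⟨pvGetPurpose res, List.mem_map_of_mem hres, hc⟩)
          have hge4 : ∀ x ∈ xs, 4 ≤ x := by
            intro x hx
            obtain ⟨res, hres, rfl⟩ := List.mem_map.mp hx
            have hne3 : pvRank (pvGetPurpose res) ≠ 3 := by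
              intro he
              have hch := (pvRank_le_three_iff _).mp (le_of_eq he)
              simp only [Bool.or_eq_true] at hch
              have hn2 := hno2 res hres
              have hn3 := hno3 res hres
              have hn4 := hno4 res hres
              simp only [Bool.or_eq_true, not_or] at hn2 hn3 hn4
              rcases hch with (((((hst | hc) | hf) | ha) | hu) | hm) | hl
              · exact hno1 res hres hst
              · exact hn2.1 hc
              · exact hn2.2 hf
              · exact hn3.1 ha
              · exact hn3.2 hu
              · exact hn4.1 hm
              · exact hn4.2 hl
            have := hge3 _ hx
            omega
          have hbest : xs.foldl min 4 = 4 :=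
            le_antisymm (pv_foldl_min_le_init xs 4)
              (pv_le_foldl_min xs 4 4 (by omega) hge4)
          rw [hbest]; rfl
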